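-- pv_equiv track=rewrite | github.com/manwar/perlweeklychallenge-club | challenge-288/sgreen/python/ch-2.py | contiguous_block
-- ===== SOURCE A (Python) =====
-- def find_block(matrix, seen, row, col):
--     rows = len(matrix)
--     cols = len(matrix[0])
--
--     # The character that we need to match
--     char = matrix[row][col]
--
--     # The directions we can move: Up, down, left, right
--     directions = [[-1, 0], [1, 0], [0, -1], [0, 1]]
--
--     # Mark the we have seen the starting cell
--     seen[row][col] = True
--
--     # Add the starting cell to the stack
--     stack = [[row, col]]
--     count = 1
--
--     while stack:
--         # Whether we found a move from the last value in the stack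
--         new_pos = False
--
--         for move in directions:
--             # Move in each direction
--             new_row = stack[-1][0] + move[0]
--             new_col = stack[-1][1] + move[1]
--
--             # Check that the move is still in bounds of the matrix, we haven't
--             #  already use that position, and it is the correct character
--             if new_row < 0 or new_row >= rows or new_col < 0 or new_col >= cols or seen[new_row][new_col] or matrix[new_row][new_col] != char:
--                 continue
--
--             # It is, add it to the stack, and increment the count
--             stack.append([new_row, new_col])
--             seen[new_row][new_col] = True
--             new_pos = True
--             count += 1
--
--         if not new_pos:
--             # We didn't find a new move, remove it from that stack.
--             stack.pop()
--
--     return count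
--
-- def contiguous_block(matrix: list) -> int:
--     rows = len(matrix)
--     cols = len(matrix[0])
--     max_block = 0
--
--     # Seed the seen table
--     seen = []
--     for i in range(rows):
--         seen.append([0] * cols)
--
--     for row in range(rows):
--         for col in range(cols):
--             if seen[row][col]:
--                 # The item at this position has already been used
--                 continue
--
--             # Find how many items in this block. If greater than max_block, replace it
--             count = find_block(matrix, seen, row, col)
--             if count > max_block:
--                 max_block = count
--
--     return max_block
-- ===== SOURCE B (Python) =====
-- def contiguous_block(matrix: list) -> int:
--     rows = len(matrix)
--     cols = len(matrix[0])
--     best = 0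
--     done = set()
--     for r in range(rows):
--         for c in range(cols):
--             if (r, c) in done:
--                 continue
--             char = matrix[r][c]
--             comp = {(r, c)}
--             frontier = [(r, c)]
--             while frontier:
--                 nf = []
--                 for x, y in frontier:
--                     for nx, ny in ((x - 1, y), (x + 1, y), (x, y - 1), (x, y + 1)):
--                         if 0 <= nx < rows and 0 <= ny < cols and (nx, ny) not in comp and matrix[nx][ny] == char:
--                             comp.add((nx, ny))
--                             nf.append((nx, ny))
--                 frontier = nf
--             done |= comp
--             best = max(best, len(comp))
--     return best
-- ===== Notes on version B (the rewrite author's own statement) =====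
-- stated objective: alternative
-- what changed: replaces the stack-based DFS with a per-cell mutable boolean 'seen' matrix and a pop-on-no-move loop by a layered BFS that grows each component as a set of coordinates via frontier expansion and takes len(comp), accumulating finished components in a 'done' set
-- outside the precondition, e.g. on contiguous_block([]): A raises IndexError, B raises IndexError
import Mathlib
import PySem

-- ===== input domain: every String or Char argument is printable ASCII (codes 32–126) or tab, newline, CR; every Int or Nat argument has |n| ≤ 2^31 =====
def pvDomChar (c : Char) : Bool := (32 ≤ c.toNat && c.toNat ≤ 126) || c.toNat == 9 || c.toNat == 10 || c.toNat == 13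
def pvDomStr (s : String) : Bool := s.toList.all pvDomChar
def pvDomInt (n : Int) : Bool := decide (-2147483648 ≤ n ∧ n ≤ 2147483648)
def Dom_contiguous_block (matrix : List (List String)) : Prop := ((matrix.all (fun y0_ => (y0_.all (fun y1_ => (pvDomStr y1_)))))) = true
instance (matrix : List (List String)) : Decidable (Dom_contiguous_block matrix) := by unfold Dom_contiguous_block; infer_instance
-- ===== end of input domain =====

-- B replaces A's stack-based DFS over a mutable boolean seen-matrix by a layered BFS growing each
-- component as a set of coordinates (alternative algorithm, same asymptotic cost).
-- A mutates its local 'seen' helper table only (not an argument); no observable side effects differ.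

-- ===== PORT A =====
-- matrix[r][c] (total form; row/col always guarded in range inside Pre_)
def pvMatAt (m : List (List String)) (r c : Int) : String :=
  PySem.List.pyGetD (PySem.List.pyGetD m r []) c ""

-- seen[r][c]
def pvSeenAt (sn : List (List Bool)) (r c : Int) : Bool :=
  PySem.List.pyGetD (PySem.List.pyGetD sn r []) c false

-- seen[r][c] = True
def pvSetTrue (sn : List (List Bool)) (r c : Int) : List (List Bool) :=
  PySem.List.pySetD sn r (PySem.List.pySetD (PySem.List.pyGetD sn r []) c true)

-- directions = [[-1, 0], [1, 0], [0, -1], [0, 1]]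
def pvDirs : List (Int × Int) := [(-1, 0), (1, 0), (0, -1), (0, 1)]

-- one direction step of A's inner 'for move in directions' loop; state = (stack, seen, count, new_pos)
def pvFbDir (m : List (List String)) (rows cols : Int) (ch : String)
    (st : List (Int × Int) × List (List Bool) × Int × Bool) (mv : Int × Int) :
    List (Int × Int) × List (List Bool) × Int × Bool :=
  let top := PySem.List.pyGetD st.1 (-1) (0, 0)     -- stack[-1]
  let nr := top.1 + mv.1
  let nc := top.2 + mv.2
  if nr < 0 ∨ rows ≤ nr ∨ nc < 0 ∨ cols ≤ nc ∨ pvSeenAt st.2.1 nr nc = true ∨ pvMatAt m nr nc ≠ ch then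
    st
  else
    (st.1 ++ [(nr, nc)], pvSetTrue st.2.1 nr nc, st.2.2.1 + 1, true)

-- A's 'while stack' loop, fueled (fuel is generous; proved sufficient below); state = (stack, seen, count)
def pvFbLoop (m : List (List String)) (rows cols : Int) (ch : String) :
    Nat → List (Int × Int) × List (List Bool) × Int → Int × List (List Bool)
  | 0, st => (st.2.2, st.2.1)
  | fuel + 1, st =>
    if st.1 = [] then (st.2.2, st.2.1)
    else
      let r := pvDirs.foldl (pvFbDir m rows cols ch) (st.1, st.2.1, st.2.2, false)
      -- 'if not new_pos: stack.pop()' (stack.pop() on a nonempty stack drops the last element)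
      pvFbLoop m rows cols ch fuel (if r.2.2.2 = true then (r.1, r.2.1, r.2.2.1) else (r.1.dropLast, r.2.1, r.2.2.1))

def pvFindBlock (m : List (List String)) (sn : List (List Bool)) (row col : Int) : Int × List (List Bool) :=
  let rows := (m.length : Int)
  let cols := ((PySem.List.pyGetD m 0 []).length : Int)
  let ch := pvMatAt m row col
  let sn1 := pvSetTrue sn row col
  pvFbLoop m rows cols ch (2 * m.length * (PySem.List.pyGetD m 0 []).length + 2) ([(row, col)], sn1, 1)

def contiguous_block (matrix : List (List String)) : Int :=
  let rows := (matrix.length : Int)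
  let cols := ((PySem.List.pyGetD matrix 0 []).length : Int)
  -- seen seeded with rows of [0]*cols (0 ported as false: entries are only truth-tested)
  let seen0 := (PySem.List.pyRange 0 rows 1).foldl
    (fun sn _ => sn ++ [List.replicate cols.toNat false]) []
  let res := (PySem.List.pyRange 0 rows 1).foldl (fun (st : List (List Bool) × Int) row =>
    (PySem.List.pyRange 0 cols 1).foldl (fun (st : List (List Bool) × Int) col =>
      if pvSeenAt st.1 row col = true then st
      else
        let fb := pvFindBlock matrix st.1 row col
        (fb.2, if fb.1 > st.2 then fb.1 else st.2)) st) (seen0, 0)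
  res.2

-- ===== PORT B =====
-- one candidate neighbour of B's inner 'for nx, ny in …' loop; state = (comp, nf)
def pvBCand (m : List (List String)) (rows cols : Int) (ch : String)
    (st : PySem.Set (Int × Int) × List (Int × Int)) (q : Int × Int) :
    PySem.Set (Int × Int) × List (Int × Int) :=
  if 0 ≤ q.1 ∧ q.1 < rows ∧ 0 ≤ q.2 ∧ q.2 < cols ∧ PySem.Set.contains st.1 q = false ∧ pvMatAt m q.1 q.2 = ch then
    (PySem.Set.add st.1 q, st.2 ++ [q])
  else st

-- one frontier cell: its four neighbour candidates
def pvBExpand (m : List (List String)) (rows cols : Int) (ch : String)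
    (st : PySem.Set (Int × Int) × List (Int × Int)) (p : Int × Int) :
    PySem.Set (Int × Int) × List (Int × Int) :=
  [(p.1 - 1, p.2), (p.1 + 1, p.2), (p.1, p.2 - 1), (p.1, p.2 + 1)].foldl (pvBCand m rows cols ch) st

-- B's 'while frontier' loop, fueled (fuel is generous; proved sufficient below)
def pvBfs (m : List (List String)) (rows cols : Int) (ch : String) :
    Nat → PySem.Set (Int × Int) → List (Int × Int) → PySem.Set (Int × Int)
  | 0, comp, _ => comp
  | fuel + 1, comp, frontier =>
    if frontier = [] then comp
    else
      let r := frontier.foldl (pvBExpand m rows cols ch) (comp, [])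
      pvBfs m rows cols ch fuel r.1 r.2

def contiguous_block_alt (matrix : List (List String)) : Int :=
  let rows := (matrix.length : Int)
  let cols := ((PySem.List.pyGetD matrix 0 []).length : Int)
  let res := (PySem.List.pyRange 0 rows 1).foldl (fun (st : PySem.Set (Int × Int) × Int) r =>
    (PySem.List.pyRange 0 cols 1).foldl (fun (st : PySem.Set (Int × Int) × Int) c =>
      if PySem.Set.contains st.1 (r, c) = true then st
      else
        let ch := pvMatAt matrix r c
        let comp := pvBfs matrix rows cols ch
          (matrix.length * (PySem.List.pyGetD matrix 0 []).length + 2)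
          (PySem.Set.ofList [(r, c)]) [(r, c)]
        (PySem.Set.union st.1 comp, max st.2 (comp.length : Int))) st) (PySem.Set.empty, 0)
  res.2

-- ===== PRECONDITION & SPEC =====
-- Pre_ is exactly where A returns: A raises IndexError on [] (len(matrix[0])) and whenever some row
-- is shorter than row 0 (matrix[r][c] is eventually indexed for every c < len(matrix[0])).
def Pre_contiguous_block (matrix : List (List String)) : Prop :=
  matrix ≠ [] ∧ ∀ row ∈ matrix, (matrix.headD []).length ≤ row.length
instance (matrix : List (List String)) : Decidable (Pre_contiguous_block matrix) := by
  unfold Pre_contiguous_block; infer_instance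

def pvWitness_contiguous_block : List (List String) := [["a", "a"], ["b", "a"]]

def Spec_contiguous_block (matrix : List (List String)) (out : Int) : Prop := out = contiguous_block_alt matrix
instance (matrix : List (List String)) (out : Int) : Decidable (Spec_contiguous_block matrix out) := by
  unfold Spec_contiguous_block; infer_instance

-- ===== CLAIM (what is proved, stated in full; the proofs are below) =====
def Claim_equal_contiguous_block : Prop := ∀ (matrix : List (List String)), Dom_contiguous_block matrix → Pre_contiguous_block matrix → Spec_contiguous_block matrix (contiguous_block matrix)

-- ===== LEMMAS AND PROOFS =====

-- ---- abstract grid vocabulary ----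
def pvInG (m : List (List String)) (p : Int × Int) : Prop :=
  0 ≤ p.1 ∧ p.1 < (m.length : Int) ∧ 0 ≤ p.2 ∧ p.2 < ((PySem.List.pyGetD m 0 []).length : Int)

def pvAdj (p q : Int × Int) : Prop :=
  (q.1 = p.1 - 1 ∧ q.2 = p.2) ∨ (q.1 = p.1 + 1 ∧ q.2 = p.2) ∨
  (q.1 = p.1 ∧ q.2 = p.2 - 1) ∨ (q.1 = p.1 ∧ q.2 = p.2 + 1)

def pvStep (m : List (List String)) (ch : String) (p q : Int × Int) : Prop :=
  pvInG m q ∧ pvAdj p q ∧ pvMatAt m q.1 q.2 = ch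

def pvReach (m : List (List String)) (ch : String) (s p : Int × Int) : Prop :=
  Relation.ReflTransGen (pvStep m ch) s p

def pvClosed (m : List (List String)) (S : Int × Int → Prop) : Prop :=
  ∀ p q, S p → pvStep m (pvMatAt m p.1 p.2) p q → S q

lemma pvAdj_symm {p q : Int × Int} (h : pvAdj p q) : pvAdj q p := by
  rcases p with ⟨a, b⟩; rcases q with ⟨x, y⟩
  unfold pvAdj at *; dsimp at *; omega

lemma pvReach_props {m ch s p} (hg : pvInG m s) (hc : pvMatAt m s.1 s.2 = ch)
    (h : pvReach m ch s p) : pvInG m p ∧ pvMatAt m p.1 p.2 = ch := by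
  induction h with
  | refl => exact ⟨hg, hc⟩
  | tail _ hstep _ => exact ⟨hstep.1, hstep.2.2⟩

-- reachable cells avoid a closed seen-set not containing the seed
lemma pvReach_not_closed {m ch s p} {S : Int × Int → Prop} (hcl : pvClosed m S)
    (hg : pvInG m s) (hc : pvMatAt m s.1 s.2 = ch) (hs : ¬ S s)
    (h : pvReach m ch s p) : ¬ S p := by
  induction h with
  | refl => exact hs
  | tail hr hstep ih =>
    rename_i b c
    intro hSc
    have hb := pvReach_props hg hc hr
    exact ih (hcl c b hSc ⟨hb.1, pvAdj_symm hstep.2.1, hb.2.trans hstep.2.2.symm⟩)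

-- ---- seen-table vocabulary ----
def pvShape (m : List (List String)) (sn : List (List Bool)) : Prop :=
  sn.length = m.length ∧ ∀ r ∈ sn, r.length = (PySem.List.pyGetD m 0 []).length

def pvUnseen (sn : List (List Bool)) : Nat := (sn.map (fun r => r.countP (fun b => !b))).sum

lemma pvCountP_set {α : Type} (p : α → Bool) (l : List α) (n : Nat) (h : n < l.length) (v : α) :
    (l.set n v).countP p + (if p l[n] then 1 else 0) = l.countP p + (if p v then 1 else 0) := by
  induction l generalizing n with
  | nil => simp at h
  | cons a t ih =>
    cases n with
    | zero => simp [List.countP_cons]; split_ifs <;> omega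
    | succ k =>
      have hk : k < t.length := by simpa using h
      have := ih k hk
      simp only [List.set_cons_succ, List.countP_cons, List.getElem_cons_succ]
      split_ifs at this ⊢ <;> omega

lemma pvSumMap_set {α : Type} (f : α → Nat) (l : List α) (n : Nat) (h : n < l.length) (x : α) :
    ((l.set n x).map f).sum + f l[n] = (l.map f).sum + f x := by
  induction l generalizing n with
  | nil => simp at h
  | cons a t ih =>
    cases n with
    | zero => simp; omega
    | succ k =>
      have hk : k < t.length := by simpa using h
      have := ih k hk
      simp only [List.set_cons_succ, List.map_cons, List.sum_cons, List.getElem_cons_succ]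
      omega

lemma pvSeenAt_eq_getElem (sn : List (List Bool)) (x y : Int) (hx0 : 0 ≤ x)
    (hx : x.toNat < sn.length) (hy0 : 0 ≤ y) (hy : y.toNat < (sn[x.toNat]).length) :
    pvSeenAt sn x y = (sn[x.toNat])[y.toNat] := by
  unfold pvSeenAt
  rw [PySem.List.pyGetD_eq_getElem sn [] hx0 (by omega), PySem.List.pyGetD_eq_getElem _ false hy0 (by omega)]

lemma pvSetTrue_eq (sn : List (List Bool)) (a b : Int) (ha0 : 0 ≤ a) (ha : a.toNat < sn.length)
    (hb0 : 0 ≤ b) :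
    pvSetTrue sn a b = sn.set a.toNat ((sn[a.toNat]).set b.toNat true) := by
  unfold pvSetTrue
  rw [PySem.List.pyGetD_eq_getElem sn [] ha0 (by omega), PySem.List.pySetD_of_nonneg _ _ hb0, PySem.List.pySetD_of_nonneg _ _ ha0]

lemma pvShape_setTrue {m : List (List String)} {sn : List (List Bool)} (hs : pvShape m sn)
    (a b : Int) (ha0 : 0 ≤ a) (ha : a.toNat < sn.length) (hb0 : 0 ≤ b) :
    pvShape m (pvSetTrue sn a b) := by
  obtain ⟨h1, h2⟩ := hs
  rw [pvSetTrue_eq sn a b ha0 ha hb0]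
  refine ⟨by simpa using h1, ?_⟩
  intro r hr
  rcases List.mem_or_eq_of_mem_set hr with h | h
  · exact h2 r h
  · subst h; rw [List.length_set]; exact h2 _ (List.getElem_mem ha)

lemma pvSeenAt_setTrue {m : List (List String)} {sn : List (List Bool)} (hs : pvShape m sn)
    {a b : Int} (hab : pvInG m (a, b)) {x y : Int} (hxy : pvInG m (x, y)) :
    pvSeenAt (pvSetTrue sn a b) x y = if x = a ∧ y = b then true else pvSeenAt sn x y := by
  obtain ⟨h1, h2⟩ := hs
  obtain ⟨ha0, ha1, hb0, hb1⟩ := hab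
  obtain ⟨hx0, hx1, hy0, hy1⟩ := hxy
  dsimp at *
  have haN : a.toNat < sn.length := by omega
  have hxN : x.toNat < sn.length := by omega
  have hrowx : (sn[x.toNat]).length = (PySem.List.pyGetD m 0 []).length :=
    h2 _ (List.getElem_mem hxN)
  rw [pvSetTrue_eq sn a b ha0 haN hb0]
  have hyx : y.toNat < ((sn.set a.toNat ((sn[a.toNat]).set b.toNat true))[x.toNat]'(by simpa using hxN)).length := by
    rcases eq_or_ne a.toNat x.toNat with h | h
    · simp [List.getElem_set, h, hrowx]; omega
    · simp [List.getElem_set, h, hrowx]; omega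
  rw [pvSeenAt_eq_getElem _ x y hx0 (by simpa using hxN) hy0 hyx]
  rw [pvSeenAt_eq_getElem sn x y hx0 hxN hy0 (by rw [hrowx]; omega)]
  by_cases hxa : x = a
  · by_cases hyb : y = b
    · have g1 : a.toNat = x.toNat := by omega
      have g2 : b.toNat = y.toNat := by omega
      simp [List.getElem_set, g1, g2, hxa, hyb]
    · have g1 : a.toNat = x.toNat := by omega
      have g2 : b.toNat ≠ y.toNat := by omega
      simp [List.getElem_set, g1, g2, hyb]
  · have g1 : a.toNat ≠ x.toNat := by omega
    simp [List.getElem_set, g1, hxa]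

lemma pvUnseen_setTrue {m : List (List String)} {sn : List (List Bool)} (hs : pvShape m sn)
    {a b : Int} (hab : pvInG m (a, b)) (hfalse : pvSeenAt sn a b = false) :
    pvUnseen (pvSetTrue sn a b) + 1 = pvUnseen sn := by
  obtain ⟨h1, h2⟩ := hs
  obtain ⟨ha0, ha1, hb0, hb1⟩ := hab
  dsimp at *
  have haN : a.toNat < sn.length := by omega
  have hrow : (sn[a.toNat]).length = (PySem.List.pyGetD m 0 []).length := h2 _ (List.getElem_mem haN)
  have hbN : b.toNat < (sn[a.toNat]).length := by omega
  have hval : (sn[a.toNat])[b.toNat] = false := by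
    rw [← pvSeenAt_eq_getElem sn a b ha0 haN hb0 hbN]; exact hfalse
  rw [pvSetTrue_eq sn a b ha0 haN hb0]
  unfold pvUnseen
  have hsum := pvSumMap_set (fun r => r.countP (fun b => !b)) sn a.toNat haN ((sn[a.toNat]).set b.toNat true)
  have hcnt := pvCountP_set (fun b => !b) (sn[a.toNat]) b.toNat hbN true
  rw [hval] at hcnt
  simp at hcnt
  omega
-- ---- the grid as a duplicate-free list of coordinates ----
def pvGrid (m : List (List String)) : List (Int × Int) :=
  (PySem.List.pyRange 0 (m.length : Int) 1) ×ˢ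
    (PySem.List.pyRange 0 (((PySem.List.pyGetD m 0 []).length : Int)) 1)

lemma pvMem_grid {m : List (List String)} {p : Int × Int} : p ∈ pvGrid m ↔ pvInG m p := by
  rcases p with ⟨x, y⟩
  unfold pvGrid pvInG
  rw [List.mem_product, PySem.List.mem_pyRange_one, PySem.List.mem_pyRange_one]
  tauto

lemma pvNodup_grid (m : List (List String)) : (pvGrid m).Nodup :=
  List.Nodup.product (PySem.List.nodup_pyRange_one _ _) (PySem.List.nodup_pyRange_one _ _)

lemma pvCountP_flatMap {α β : Type} (l : List α) (g : α → List β) (p : β → Bool) :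
    (l.flatMap g).countP p = (l.map (fun a => (g a).countP p)).sum := by
  induction l with
  | nil => simp
  | cons a t ih => simp [List.countP_append, ih]

-- a shaped table's false-count is the count of unseen grid cells
lemma pvUnseen_eq_countP {m : List (List String)} {sn : List (List Bool)} (hs : pvShape m sn) :
    pvUnseen sn = (pvGrid m).countP (fun p => !pvSeenAt sn p.1 p.2) := by
  obtain ⟨h1, h2⟩ := hs
  unfold pvGrid
  rw [show ((PySem.List.pyRange 0 (m.length : Int) 1) ×ˢ
      (PySem.List.pyRange 0 (((PySem.List.pyGetD m 0 []).length : Int)) 1) : List (Int × Int)) =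
      (PySem.List.pyRange 0 (m.length : Int) 1).flatMap
        (fun r => (PySem.List.pyRange 0 (((PySem.List.pyGetD m 0 []).length : Int)) 1).map (fun c => (r, c)))
      from rfl]
  rw [pvCountP_flatMap]
  have hrow : ∀ r ∈ PySem.List.pyRange 0 (m.length : Int) 1,
      ((PySem.List.pyRange 0 (((PySem.List.pyGetD m 0 []).length : Int)) 1).map
        (fun c => ((r, c) : Int × Int))).countP (fun p => !pvSeenAt sn p.1 p.2)
      = (PySem.List.pyGetD sn r []).countP (fun b => !b) := by
    intro r hr
    rw [PySem.List.mem_pyRange_one] at hr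
    rw [List.countP_map]
    have hrN : r.toNat < sn.length := by omega
    have hlen : (PySem.List.pyGetD sn r []).length = (PySem.List.pyGetD m 0 []).length := by
      rw [PySem.List.pyGetD_eq_getElem sn [] hr.1 (by omega)]
      exact h2 _ (List.getElem_mem hrN)
    rw [← hlen]
    have this1 := PySem.List.map_pyGetD_pyRange_zero (PySem.List.pyGetD sn r []) false
    calc List.countP ((fun p => !pvSeenAt sn p.1 p.2) ∘ fun c => ((r, c) : Int × Int))
          (PySem.List.pyRange 0 (((PySem.List.pyGetD sn r []).length : Int)) 1)
        = List.countP (fun b => !b)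
            ((PySem.List.pyRange 0 (((PySem.List.pyGetD sn r []).length : Int)) 1).map
              (fun c => PySem.List.pyGetD (PySem.List.pyGetD sn r []) c false)) :=
          by exact (List.countP_map (p := fun b => !b) (f := fun c => PySem.List.pyGetD (PySem.List.pyGetD sn r []) c false)).symm
      _ = List.countP (fun b => !b) (PySem.List.pyGetD sn r []) := by
          rw [show (((PySem.List.pyGetD sn r []).length : Int))
              = PySem.List.len (PySem.List.pyGetD sn r []) from rfl, this1]
  calc pvUnseen sn
      = ((PySem.List.pyRange 0 (m.length : Int) 1).map
          (fun r => (PySem.List.pyGetD sn r []).countP (fun b => !b))).sum := by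
        unfold pvUnseen
        rw [show (PySem.List.pyRange 0 (m.length : Int) 1).map
            (fun r => (PySem.List.pyGetD sn r []).countP (fun b => !b))
            = ((PySem.List.pyRange 0 (m.length : Int) 1).map
                (fun r => PySem.List.pyGetD sn r [])).map (fun l => l.countP (fun b => !b)) from by
          rw [List.map_map]; rfl]
        have := PySem.List.map_pyGetD_pyRange_zero sn ([] : List Bool)
        rw [show PySem.List.len sn = ((sn.length : Int)) from rfl] at this
        rw [← h1, this]
    _ = ((PySem.List.pyRange 0 (m.length : Int) 1).map
          (fun r => ((PySem.List.pyRange 0 (((PySem.List.pyGetD m 0 []).length : Int)) 1).map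
            (fun c => ((r, c) : Int × Int))).countP (fun p => !pvSeenAt sn p.1 p.2))).sum := by
        rw [List.map_congr_left (fun r hr => (hrow r hr).symm)]

-- ---- A-side: invariant of the DFS stack loop ----
structure pvAInv (m : List (List String)) (ch : String) (seed : Int × Int)
    (sn0 : List (List Bool)) (st : List (Int × Int) × List (List Bool) × Int) : Prop where
  shape : pvShape m st.2.1
  mono : ∀ p : Int × Int, pvInG m p → pvSeenAt sn0 p.1 p.2 = true → pvSeenAt st.2.1 p.1 p.2 = true
  seedMk : pvSeenAt st.2.1 seed.1 seed.2 = true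
  sound : ∀ p : Int × Int, pvInG m p → pvSeenAt st.2.1 p.1 p.2 = true →
    pvSeenAt sn0 p.1 p.2 = false → pvReach m ch seed p
  stackNew : ∀ p ∈ st.1, pvInG m p ∧ pvSeenAt st.2.1 p.1 p.2 = true ∧ pvSeenAt sn0 p.1 p.2 = false
  cnt : st.2.2 + (pvUnseen st.2.1 : Int) = (pvUnseen sn0 : Int)
  closedOff : ∀ p : Int × Int, pvInG m p → pvSeenAt st.2.1 p.1 p.2 = true →
    pvSeenAt sn0 p.1 p.2 = false → p ∉ st.1 → ∀ q, pvStep m ch p q → pvSeenAt st.2.1 q.1 q.2 = true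

lemma pvGuard_iff (m : List (List String)) (sn : List (List Bool)) (ch : String) (nr nc : Int) :
    (¬ (nr < 0 ∨ (m.length : Int) ≤ nr ∨ nc < 0 ∨ ((PySem.List.pyGetD m 0 []).length : Int) ≤ nc ∨
        pvSeenAt sn nr nc = true ∨ pvMatAt m nr nc ≠ ch)) ↔
    (pvInG m (nr, nc) ∧ pvSeenAt sn nr nc = false ∧ pvMatAt m nr nc = ch) := by
  push Not
  unfold pvInG
  constructor
  · rintro ⟨h1, h2, h3, h4, h5, h6⟩
    exact ⟨⟨by omega, by omega, by omega, by omega⟩, by simpa using h5, h6⟩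
  · rintro ⟨⟨g1, g2, g3, g4⟩, g5, g6⟩
    exact ⟨by omega, by omega, by omega, by omega, by simp [g5], g6⟩

lemma pvAdj_of_mem_dirs {mv : Int × Int} (h : mv ∈ pvDirs) (t : Int × Int) :
    pvAdj t (t.1 + mv.1, t.2 + mv.2) := by
  fin_cases h <;> (unfold pvAdj; dsimp; omega)

lemma pvAdj_exists_mv {t q : Int × Int} (h : pvAdj t q) :
    ∃ mv ∈ pvDirs, q = (t.1 + mv.1, t.2 + mv.2) := by
  rcases t with ⟨a, b⟩; rcases q with ⟨x, y⟩
  unfold pvAdj at h; dsimp at h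
  unfold pvDirs
  rcases h with ⟨h1, h2⟩ | ⟨h1, h2⟩ | ⟨h1, h2⟩ | ⟨h1, h2⟩
  · exact ⟨(-1, 0), by simp, by simp [h1, h2] <;> omega⟩
  · exact ⟨(1, 0), by simp, by simp [h1, h2] <;> omega⟩
  · exact ⟨(0, -1), by simp, by simp [h1, h2] <;> omega⟩
  · exact ⟨(0, 1), by simp, by simp [h1, h2] <;> omega⟩

lemma pvMem_getLast {α : Type} {l : List α} {p : α} (hp : p ∈ l) (hnd : p ∉ l.dropLast) :
    ∀ h : l ≠ [], p = l.getLast h := by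
  intro h
  have := List.dropLast_concat_getLast h
  rw [← this] at hp
  rcases List.mem_append.1 hp with h1 | h1
  · exact absurd h1 hnd
  · simpa using h1

lemma pvFbDir_inv {m : List (List String)} {ch : String} {seed : Int × Int}
    {sn0 : List (List Bool)} (hseed : pvInG m seed)
    (stk : List (Int × Int)) (sn : List (List Bool)) (cnt : Int) (np : Bool) (mv : Int × Int)
    (hmv : ∀ t : Int × Int, pvAdj t (t.1 + mv.1, t.2 + mv.2))
    (hInv : pvAInv m ch seed sn0 (stk, sn, cnt)) (hne : stk ≠ []) :
    (pvAInv m ch seed sn0 ((pvFbDir m (m.length : Int) (((PySem.List.pyGetD m 0 []).length : Int)) ch (stk, sn, cnt, np) mv).1,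
      (pvFbDir m (m.length : Int) (((PySem.List.pyGetD m 0 []).length : Int)) ch (stk, sn, cnt, np) mv).2.1,
      (pvFbDir m (m.length : Int) (((PySem.List.pyGetD m 0 []).length : Int)) ch (stk, sn, cnt, np) mv).2.2.1)) ∧
    (pvFbDir m (m.length : Int) (((PySem.List.pyGetD m 0 []).length : Int)) ch (stk, sn, cnt, np) mv).1 ≠ [] ∧
    2 * pvUnseen (pvFbDir m (m.length : Int) (((PySem.List.pyGetD m 0 []).length : Int)) ch (stk, sn, cnt, np) mv).2.1 +
      (pvFbDir m (m.length : Int) (((PySem.List.pyGetD m 0 []).length : Int)) ch (stk, sn, cnt, np) mv).1.length ≤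
      2 * pvUnseen sn + stk.length ∧
    ((pvFbDir m (m.length : Int) (((PySem.List.pyGetD m 0 []).length : Int)) ch (stk, sn, cnt, np) mv).2.2.2 = false →
      np = false ∧ (pvFbDir m (m.length : Int) (((PySem.List.pyGetD m 0 []).length : Int)) ch (stk, sn, cnt, np) mv) = (stk, sn, cnt, np) ∧
      (∀ q : Int × Int, pvStep m ch (stk.getLast hne) q →
        q = ((stk.getLast hne).1 + mv.1, (stk.getLast hne).2 + mv.2) → pvSeenAt sn q.1 q.2 = true)) ∧
    (np = false → (pvFbDir m (m.length : Int) (((PySem.List.pyGetD m 0 []).length : Int)) ch (stk, sn, cnt, np) mv).2.2.2 = true →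
      2 * pvUnseen (pvFbDir m (m.length : Int) (((PySem.List.pyGetD m 0 []).length : Int)) ch (stk, sn, cnt, np) mv).2.1 +
        (pvFbDir m (m.length : Int) (((PySem.List.pyGetD m 0 []).length : Int)) ch (stk, sn, cnt, np) mv).1.length <
        2 * pvUnseen sn + stk.length) ∧
    (∀ p : Int × Int, pvInG m p → pvSeenAt sn p.1 p.2 = true →
      pvSeenAt (pvFbDir m (m.length : Int) (((PySem.List.pyGetD m 0 []).length : Int)) ch (stk, sn, cnt, np) mv).2.1 p.1 p.2 = true) := by
  have htop : PySem.List.pyGetD stk (-1) ((0 : Int), (0 : Int)) = stk.getLast hne :=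
    PySem.List.pyGetD_neg_one stk _ hne
  set t := stk.getLast hne with ht
  have htmem : t ∈ stk := List.getLast_mem hne
  by_cases hg : (t.1 + mv.1) < 0 ∨ (m.length : Int) ≤ (t.1 + mv.1) ∨ (t.2 + mv.2) < 0 ∨
      (((PySem.List.pyGetD m 0 []).length : Int)) ≤ (t.2 + mv.2) ∨
      pvSeenAt sn (t.1 + mv.1) (t.2 + mv.2) = true ∨ pvMatAt m (t.1 + mv.1) (t.2 + mv.2) ≠ ch
  · have hr : pvFbDir m (m.length : Int) (((PySem.List.pyGetD m 0 []).length : Int)) ch (stk, sn, cnt, np) mv = (stk, sn, cnt, np) := by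
      unfold pvFbDir
      rw [show PySem.List.pyGetD (stk, sn, cnt, np).1 (-1) ((0 : Int), (0 : Int)) = t from htop]
      simp only [if_pos hg]
    rw [hr]
    refine ⟨hInv, hne, le_refl _, ?_, by simp, fun p _ h => h⟩
    intro hnp
    refine ⟨hnp, rfl, ?_⟩
    rintro q hq rfl
    rcases hg with h | h | h | h | h | h
    · exact absurd hq.1.1 (by dsimp; omega)
    · exact absurd hq.1.2.1 (by dsimp; omega)
    · exact absurd hq.1.2.2.1 (by dsimp; omega)
    · exact absurd hq.1.2.2.2 (by dsimp; omega)
    · exact h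
    · exact absurd hq.2.2 h
  · have hq := (pvGuard_iff m sn ch (t.1 + mv.1) (t.2 + mv.2)).1 hg
    obtain ⟨hqg, hqs, hqc⟩ := hq
    have hr : pvFbDir m (m.length : Int) (((PySem.List.pyGetD m 0 []).length : Int)) ch (stk, sn, cnt, np) mv =
        (stk ++ [(t.1 + mv.1, t.2 + mv.2)], pvSetTrue sn (t.1 + mv.1) (t.2 + mv.2), cnt + 1, true) := by
      unfold pvFbDir
      rw [show PySem.List.pyGetD (stk, sn, cnt, np).1 (-1) ((0 : Int), (0 : Int)) = t from htop]
      simp only [if_neg hg]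
    rw [hr]
    have hlk : ∀ x y : Int, pvInG m (x, y) →
        pvSeenAt (pvSetTrue sn (t.1 + mv.1) (t.2 + mv.2)) x y =
          if x = t.1 + mv.1 ∧ y = t.2 + mv.2 then true else pvSeenAt sn x y :=
      fun x y hxy => pvSeenAt_setTrue hInv.shape hqg hxy
    have hstep : pvStep m ch t (t.1 + mv.1, t.2 + mv.2) := ⟨hqg, hmv t, hqc⟩
    have htnew := hInv.stackNew t htmem
    have hreach_t : pvReach m ch seed t := hInv.sound t htnew.1 htnew.2.1 htnew.2.2
    have hreach_q : pvReach m ch seed (t.1 + mv.1, t.2 + mv.2) :=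
      Relation.ReflTransGen.tail hreach_t hstep
    have huns : pvUnseen (pvSetTrue sn (t.1 + mv.1) (t.2 + mv.2)) + 1 = pvUnseen sn :=
      pvUnseen_setTrue hInv.shape hqg hqs
    have hmono' : ∀ p : Int × Int, pvInG m p → pvSeenAt sn p.1 p.2 = true →
        pvSeenAt (pvSetTrue sn (t.1 + mv.1) (t.2 + mv.2)) p.1 p.2 = true := by
      intro p hp hsp
      rw [hlk p.1 p.2 hp]
      split_ifs <;> simp [hsp]
    have hq0 : pvSeenAt sn0 (t.1 + mv.1) (t.2 + mv.2) = false := by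
      by_contra h
      rw [Bool.not_eq_false] at h
      have := hInv.mono _ hqg h
      rw [hqs] at this
      exact Bool.false_ne_true this
    constructor
    · refine ⟨pvShape_setTrue hInv.shape _ _ hqg.1 (by
          have h1 := hInv.shape.1
          have h2 := hqg.2.1
          dsimp at h2
          omega) hqg.2.2.1,
        fun p hp hp0 => hmono' p hp (hInv.mono p hp hp0),
        hmono' seed hseed hInv.seedMk, ?_, ?_, ?_, ?_⟩
      · intro p hp hsp hp0
        rw [hlk p.1 p.2 hp] at hsp
        by_cases he : p.1 = t.1 + mv.1 ∧ p.2 = t.2 + mv.2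
        · have hpq : p = (t.1 + mv.1, t.2 + mv.2) := Prod.ext he.1 he.2
          rw [hpq]; exact hreach_q
        · rw [if_neg he] at hsp
          exact hInv.sound p hp hsp hp0
      · intro p hp
        rcases List.mem_append.1 hp with h | h
        · have hold := hInv.stackNew p h
          exact ⟨hold.1, hmono' p hold.1 hold.2.1, hold.2.2⟩
        · have hpq : p = (t.1 + mv.1, t.2 + mv.2) := by simpa using h
          rw [hpq]
          exact ⟨hqg, by rw [hlk _ _ hqg]; simp, hq0⟩
      · have hc : cnt + (pvUnseen sn : Int) = (pvUnseen sn0 : Int) := hInv.cnt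
        show (cnt + 1) + (pvUnseen (pvSetTrue sn (t.1 + mv.1) (t.2 + mv.2)) : Int) = (pvUnseen sn0 : Int)
        omega
      · intro p hp hsp hp0 hpstk q hq
        have hpne : ¬ (p.1 = t.1 + mv.1 ∧ p.2 = t.2 + mv.2) := by
          intro he
          exact hpstk (List.mem_append.2 (Or.inr (by simp [Prod.ext_iff, he.1, he.2])))
        rw [hlk p.1 p.2 hp, if_neg hpne] at hsp
        have hcl := hInv.closedOff p hp hsp hp0 (fun h => hpstk (List.mem_append.2 (Or.inl h))) q hq
        exact hmono' q hq.1 hcl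
    refine ⟨by simp, ?_, by simp, ?_, hmono'⟩
    · show 2 * pvUnseen (pvSetTrue sn (t.1 + mv.1) (t.2 + mv.2)) +
        (stk ++ [(t.1 + mv.1, t.2 + mv.2)]).length ≤ 2 * pvUnseen sn + stk.length
      simp only [List.length_append, List.length_cons, List.length_nil]
      omega
    · intro _ _
      show 2 * pvUnseen (pvSetTrue sn (t.1 + mv.1) (t.2 + mv.2)) +
        (stk ++ [(t.1 + mv.1, t.2 + mv.2)]).length < 2 * pvUnseen sn + stk.length
      simp only [List.length_append, List.length_cons, List.length_nil]
      omega

def pvPassR (m : List (List String)) (ch : String) (mvs : List (Int × Int))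
    (st : List (Int × Int) × List (List Bool) × Int × Bool) :
    List (Int × Int) × List (List Bool) × Int × Bool :=
  mvs.foldl (pvFbDir m (m.length : Int) (((PySem.List.pyGetD m 0 []).length : Int)) ch) st

lemma pvFbPass {m : List (List String)} {ch : String} {seed : Int × Int} {sn0 : List (List Bool)}
    (hseed : pvInG m seed) :
    ∀ (mvs : List (Int × Int)), (∀ mv ∈ mvs, ∀ t : Int × Int, pvAdj t (t.1 + mv.1, t.2 + mv.2)) →
    ∀ (stk : List (Int × Int)) (sn : List (List Bool)) (cnt : Int) (np : Bool),
    pvAInv m ch seed sn0 (stk, sn, cnt) → ∀ hne : stk ≠ [],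
    pvAInv m ch seed sn0 ((pvPassR m ch mvs (stk, sn, cnt, np)).1,
      (pvPassR m ch mvs (stk, sn, cnt, np)).2.1, (pvPassR m ch mvs (stk, sn, cnt, np)).2.2.1) ∧
    (pvPassR m ch mvs (stk, sn, cnt, np)).1 ≠ [] ∧
    2 * pvUnseen (pvPassR m ch mvs (stk, sn, cnt, np)).2.1 +
      (pvPassR m ch mvs (stk, sn, cnt, np)).1.length ≤ 2 * pvUnseen sn + stk.length ∧
    ((pvPassR m ch mvs (stk, sn, cnt, np)).2.2.2 = false → np = false ∧
      pvPassR m ch mvs (stk, sn, cnt, np) = (stk, sn, cnt, np) ∧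
      (∀ q : Int × Int, pvStep m ch (stk.getLast hne) q →
        (∃ mv ∈ mvs, q = ((stk.getLast hne).1 + mv.1, (stk.getLast hne).2 + mv.2)) →
        pvSeenAt sn q.1 q.2 = true)) ∧
    (np = false → (pvPassR m ch mvs (stk, sn, cnt, np)).2.2.2 = true →
      2 * pvUnseen (pvPassR m ch mvs (stk, sn, cnt, np)).2.1 +
        (pvPassR m ch mvs (stk, sn, cnt, np)).1.length < 2 * pvUnseen sn + stk.length) ∧
    (∀ p : Int × Int, pvInG m p → pvSeenAt sn p.1 p.2 = true →
      pvSeenAt (pvPassR m ch mvs (stk, sn, cnt, np)).2.1 p.1 p.2 = true) := by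
  intro mvs
  induction mvs with
  | nil =>
    intro _ stk sn cnt np hInv hne
    refine ⟨hInv, hne, le_refl _, ?_, by intro h1 h2; rw [h1] at h2; simp [pvPassR] at h2, fun p _ h => h⟩
    intro hnp
    exact ⟨hnp, rfl, by rintro q _ ⟨mv, hmv, _⟩; simp at hmv⟩
  | cons mv mvs ih =>
    intro hmvs stk sn cnt np hInv hne
    have hstep := pvFbDir_inv hseed stk sn cnt np mv (hmvs mv (by simp)) hInv hne
    rcases hr1 : pvFbDir m (m.length : Int) (((PySem.List.pyGetD m 0 []).length : Int)) ch (stk, sn, cnt, np) mv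
      with ⟨stk1, sn1, cnt1, np1⟩
    rw [hr1] at hstep
    obtain ⟨hInv1, hne1, hle1, hfail1, hstrict1, hmono1⟩ := hstep
    have hih := ih (fun mv' h t => hmvs mv' (by simp [h]) t) stk1 sn1 cnt1 np1 hInv1 hne1
    have hfold : pvPassR m ch (mv :: mvs) (stk, sn, cnt, np) = pvPassR m ch mvs (stk1, sn1, cnt1, np1) := by
      unfold pvPassR
      rw [List.foldl_cons, hr1]
    rw [hfold]
    obtain ⟨ihInv, ihne, ihle, ihfail, ihstrict, ihmono⟩ := hih
    refine ⟨ihInv, ihne, le_trans ihle hle1, ?_, ?_, fun p hp hsp => ihmono p hp (hmono1 p hp hsp)⟩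
    · intro hnpf
      obtain ⟨hnp1f, heq, hfails⟩ := ihfail hnpf
      obtain ⟨hnpf0, heq0, hfail0⟩ := hfail1 hnp1f
      have hstk1 : stk1 = stk := congrArg Prod.fst heq0
      have hsn1 : sn1 = sn := congrArg (fun x => x.2.1) heq0
      have hcnt1 : cnt1 = cnt := congrArg (fun x => x.2.2.1) heq0
      have hnp1 : np1 = np := congrArg (fun x => x.2.2.2) heq0
      refine ⟨by rw [← hnp1]; exact hnp1f, by rw [heq, hstk1, hsn1, hcnt1, hnp1], ?_⟩
      rintro q hq ⟨mv', hmv', hqeq⟩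
      rcases List.mem_cons.1 hmv' with h | h
      · exact hfail0 q hq (by rw [hqeq, h])
      · subst hstk1 hsn1
        have := hfails q hq ⟨mv', h, by rw [hqeq]⟩
        exact this
    · intro hnpf hnpt
      rcases Bool.eq_false_or_eq_true np1 with h | h
      · subst h
        have hs1 : 2 * pvUnseen sn1 + stk1.length < 2 * pvUnseen sn + stk.length :=
          hstrict1 hnpf rfl
        omega
      · subst h
        obtain ⟨_, heq0, _⟩ := hfail1 rfl
        have hstk1 : stk1 = stk := congrArg Prod.fst heq0
        have hsn1 : sn1 = sn := congrArg (fun x => x.2.1) heq0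
        have hx := ihstrict rfl hnpt
        rw [hstk1, hsn1] at hx ⊢
        exact hx

lemma pvFbLoop_spec {m : List (List String)} {ch : String} {seed : Int × Int} {sn0 : List (List Bool)}
    (hseed : pvInG m seed) (hch : pvMatAt m seed.1 seed.2 = ch)
    (h00 : pvSeenAt sn0 seed.1 seed.2 = false)
    (hcl0 : ∀ p q : Int × Int, pvInG m p → pvSeenAt sn0 p.1 p.2 = true →
      pvStep m (pvMatAt m p.1 p.2) p q → pvSeenAt sn0 q.1 q.2 = true) :
    ∀ (fuel : Nat) (stk : List (Int × Int)) (sn : List (List Bool)) (cnt : Int),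
    pvAInv m ch seed sn0 (stk, sn, cnt) → 2 * pvUnseen sn + stk.length < fuel →
    pvShape m (pvFbLoop m (m.length : Int) (((PySem.List.pyGetD m 0 []).length : Int)) ch fuel (stk, sn, cnt)).2 ∧
    (∀ p : Int × Int, pvInG m p →
      (pvSeenAt (pvFbLoop m (m.length : Int) (((PySem.List.pyGetD m 0 []).length : Int)) ch fuel (stk, sn, cnt)).2 p.1 p.2 = true ↔
        (pvSeenAt sn0 p.1 p.2 = true ∨ pvReach m ch seed p))) ∧
    (pvFbLoop m (m.length : Int) (((PySem.List.pyGetD m 0 []).length : Int)) ch fuel (stk, sn, cnt)).1 +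
      (pvUnseen (pvFbLoop m (m.length : Int) (((PySem.List.pyGetD m 0 []).length : Int)) ch fuel (stk, sn, cnt)).2 : Int) =
      (pvUnseen sn0 : Int) := by
  have hS : pvClosed m (fun p => pvInG m p ∧ pvSeenAt sn0 p.1 p.2 = true) :=
    fun p q hp hq => ⟨hq.1, hcl0 p q hp.1 hp.2 hq⟩
  have hnot : ∀ x : Int × Int, pvReach m ch seed x → pvInG m x → pvSeenAt sn0 x.1 x.2 = false := by
    intro x hx hgx
    have := pvReach_not_closed hS hseed hch
      (fun hc => by rw [h00] at hc; exact Bool.false_ne_true hc.2) hx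
    by_contra hh
    rw [Bool.not_eq_false] at hh
    exact this ⟨hgx, hh⟩
  intro fuel
  induction fuel with
  | zero => intro stk sn cnt _ hm; omega
  | succ f ih =>
    intro stk sn cnt hInv hm
    by_cases hstk : stk = []
    · subst hstk
      have hloop : pvFbLoop m (m.length : Int) (((PySem.List.pyGetD m 0 []).length : Int)) ch (f + 1)
          (([] : List (Int × Int)), sn, cnt) = (cnt, sn) := by
        simp [pvFbLoop]
      rw [hloop]
      refine ⟨hInv.shape, ?_, hInv.cnt⟩
      intro p hp
      constructor
      · intro hsp
        by_cases h0 : pvSeenAt sn0 p.1 p.2 = true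
        · exact Or.inl h0
        · exact Or.inr (hInv.sound p hp hsp (by rw [Bool.not_eq_true] at h0; exact h0))
      · rintro (h | h)
        · exact hInv.mono p hp h
        · clear hp
          induction h with
          | refl => exact hInv.seedMk
          | tail hr hstep ihr =>
            rename_i b c
            have hb := pvReach_props hseed hch hr
            exact hInv.closedOff b hb.1 ihr (hnot b hr hb.1) (by simp) c hstep
    · have hpass := pvFbPass hseed pvDirs (fun mv h t => pvAdj_of_mem_dirs h t) stk sn cnt false hInv hstk
      rcases hrp : pvPassR m ch pvDirs (stk, sn, cnt, false) with ⟨stk2, sn2, cnt2, np2⟩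
      rw [hrp] at hpass
      obtain ⟨hInv2, hne2, hle2, hfail2, hstrict2, hmono2⟩ := hpass
      have hloop : pvFbLoop m (m.length : Int) (((PySem.List.pyGetD m 0 []).length : Int)) ch (f + 1) (stk, sn, cnt) =
          pvFbLoop m (m.length : Int) (((PySem.List.pyGetD m 0 []).length : Int)) ch f
            (if np2 = true then (stk2, sn2, cnt2) else (stk2.dropLast, sn2, cnt2)) := by
        conv_lhs => rw [pvFbLoop]
        rw [if_neg hstk]
        rw [show (pvDirs.foldl (pvFbDir m (m.length : Int) (((PySem.List.pyGetD m 0 []).length : Int)) ch) (stk, sn, cnt, false)) = pvPassR m ch pvDirs (stk, sn, cnt, false) from rfl]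
        rw [hrp]
      rw [hloop]
      by_cases hnp2 : np2 = true
      · rw [if_pos hnp2]
        subst hnp2
        have hlt : 2 * pvUnseen sn2 + stk2.length < 2 * pvUnseen sn + stk.length := hstrict2 rfl rfl
        exact ih stk2 sn2 cnt2 hInv2 (by omega)
      · rw [if_neg hnp2]
        rw [Bool.not_eq_true] at hnp2
        subst hnp2
        obtain ⟨_, heq, hfails⟩ := hfail2 rfl
        have hstk2 : stk2 = stk := congrArg Prod.fst heq
        have hsn2 : sn2 = sn := congrArg (fun x => x.2.1) heq
        have hcnt2 : cnt2 = cnt := congrArg (fun x => x.2.2.1) heq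
        subst hstk2 hsn2 hcnt2
        have hInv' : pvAInv m ch seed sn0 (stk2.dropLast, sn2, cnt2) := by
          refine ⟨hInv.shape, hInv.mono, hInv.seedMk, hInv.sound, ?_, hInv.cnt, ?_⟩
          · exact fun p hp => hInv.stackNew p ((List.dropLast_sublist stk2).subset hp)
          · intro p hp hsp hp0 hpd q hq
            by_cases hpm : p ∈ stk2
            · have hpl := pvMem_getLast hpm hpd hstk
              rw [← hpl] at hfails
              exact hfails q hq (pvAdj_exists_mv hq.2.1)
            · exact hInv.closedOff p hp hsp hp0 hpm q hq
        have hlen : stk2.dropLast.length = stk2.length - 1 := by simp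
        have hne' : stk2.length ≥ 1 := by
          cases stk2
          · exact absurd rfl hstk
          · simp
        exact ih stk2.dropLast sn2 cnt2 hInv' (by omega)

lemma pvUnseen_le {m : List (List String)} {sn : List (List Bool)} (hs : pvShape m sn) :
    pvUnseen sn ≤ m.length * (PySem.List.pyGetD m 0 []).length := by
  rw [pvUnseen_eq_countP hs]
  calc (pvGrid m).countP (fun p => !pvSeenAt sn p.1 p.2) ≤ (pvGrid m).length := List.countP_le_length
    _ = m.length * (PySem.List.pyGetD m 0 []).length := by
        unfold pvGrid
        rw [List.length_product, PySem.List.length_pyRange_one, PySem.List.length_pyRange_one]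
        simp

lemma pvFindBlock_spec {m : List (List String)} {sn0 : List (List Bool)} (hsh : pvShape m sn0)
    (hcl0 : ∀ p q : Int × Int, pvInG m p → pvSeenAt sn0 p.1 p.2 = true →
      pvStep m (pvMatAt m p.1 p.2) p q → pvSeenAt sn0 q.1 q.2 = true)
    {seed : Int × Int} (hseed : pvInG m seed) (h00 : pvSeenAt sn0 seed.1 seed.2 = false) :
    pvShape m (pvFindBlock m sn0 seed.1 seed.2).2 ∧
    (∀ p : Int × Int, pvInG m p →
      (pvSeenAt (pvFindBlock m sn0 seed.1 seed.2).2 p.1 p.2 = true ↔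
        (pvSeenAt sn0 p.1 p.2 = true ∨ pvReach m (pvMatAt m seed.1 seed.2) seed p))) ∧
    (pvFindBlock m sn0 seed.1 seed.2).1 +
      (pvUnseen (pvFindBlock m sn0 seed.1 seed.2).2 : Int) = (pvUnseen sn0 : Int) := by
  obtain ⟨hs1, hs2⟩ := hsh
  obtain ⟨ha0, ha1, hb0, hb1⟩ := id hseed
  have haN : seed.1.toNat < sn0.length := by dsimp at ha1 ⊢; omega
  have hseed' : pvInG m (seed.1, seed.2) := ⟨ha0, ha1, hb0, hb1⟩
  have hlk : ∀ x y : Int, pvInG m (x, y) →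
      pvSeenAt (pvSetTrue sn0 seed.1 seed.2) x y =
        if x = seed.1 ∧ y = seed.2 then true else pvSeenAt sn0 x y :=
    fun x y hxy => pvSeenAt_setTrue ⟨hs1, hs2⟩ hseed' hxy
  have huns : pvUnseen (pvSetTrue sn0 seed.1 seed.2) + 1 = pvUnseen sn0 :=
    pvUnseen_setTrue ⟨hs1, hs2⟩ hseed' (by exact h00)
  have hInv : pvAInv m (pvMatAt m seed.1 seed.2) seed sn0
      ([(seed.1, seed.2)], pvSetTrue sn0 seed.1 seed.2, 1) := by
    refine ⟨pvShape_setTrue ⟨hs1, hs2⟩ _ _ ha0 haN hb0, ?_, ?_, ?_, ?_, ?_, ?_⟩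
    · intro p hp hp0
      rw [hlk p.1 p.2 hp]
      split_ifs <;> simp [hp0]
    · rw [hlk seed.1 seed.2 hseed']
      simp
    · intro p hp hsp hp0
      rw [hlk p.1 p.2 hp] at hsp
      by_cases he : p.1 = seed.1 ∧ p.2 = seed.2
      · have hps : p = seed := Prod.ext he.1 he.2
        rw [hps]
        exact Relation.ReflTransGen.refl
      · rw [if_neg he] at hsp
        rw [hp0] at hsp
        exact absurd hsp (by simp)
    · intro p hp
      have hpe : p = (seed.1, seed.2) := by simpa using hp
      rw [hpe]
      exact ⟨hseed', by rw [hlk _ _ hseed']; simp, h00⟩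
    · show (1 : Int) + (pvUnseen (pvSetTrue sn0 seed.1 seed.2) : Int) = (pvUnseen sn0 : Int)
      omega
    · intro p hp hsp hp0 hpstk q hq
      exfalso
      rw [hlk p.1 p.2 hp] at hsp
      by_cases he : p.1 = seed.1 ∧ p.2 = seed.2
      · exact hpstk (by simp [Prod.ext_iff, he.1, he.2])
      · rw [if_neg he] at hsp
        rw [hp0] at hsp
        exact absurd hsp (by simp)
  have hfuel : 2 * pvUnseen (pvSetTrue sn0 seed.1 seed.2) + ([(seed.1, seed.2)] : List (Int × Int)).length <
      2 * m.length * (PySem.List.pyGetD m 0 []).length + 2 := by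
    have h1 := pvUnseen_le (m := m) ⟨hs1, hs2⟩
    simp only [List.length_cons, List.length_nil]
    rw [Nat.mul_assoc]
    omega
  have hmain := pvFbLoop_spec hseed rfl h00 hcl0
    (2 * m.length * (PySem.List.pyGetD m 0 []).length + 2)
    [(seed.1, seed.2)] (pvSetTrue sn0 seed.1 seed.2) 1 hInv hfuel
  exact hmain

-- ---- B-side: invariant of the BFS loop ----
structure pvBInv (m : List (List String)) (ch : String) (seed : Int × Int)
    (comp frontier : List (Int × Int)) : Prop where
  nodup : comp.Nodup
  seedIn : seed ∈ comp
  sub : ∀ p ∈ comp, pvInG m p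
  sound : ∀ p ∈ comp, pvReach m ch seed p
  frontSub : ∀ p ∈ frontier, p ∈ comp
  closedOff : ∀ p ∈ comp, p ∉ frontier → ∀ q, pvStep m ch p q → q ∈ comp

lemma pvBCand_fold {m : List (List String)} {ch : String} {seed : Int × Int}
    (x : Int × Int) (hx : pvReach m ch seed x) :
    ∀ (cs : List (Int × Int)), (∀ q ∈ cs, pvAdj x q) →
    ∀ (cm nf : List (Int × Int)), cm.Nodup → (∀ p ∈ cm, pvInG m p) →
      (∀ p ∈ cm, pvReach m ch seed p) →
    (cs.foldl (pvBCand m (m.length : Int) (((PySem.List.pyGetD m 0 []).length : Int)) ch) (cm, nf)).1.Nodup ∧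
    (∀ p ∈ cm, p ∈ (cs.foldl (pvBCand m (m.length : Int) (((PySem.List.pyGetD m 0 []).length : Int)) ch) (cm, nf)).1) ∧
    (∀ p ∈ (cs.foldl (pvBCand m (m.length : Int) (((PySem.List.pyGetD m 0 []).length : Int)) ch) (cm, nf)).1, pvInG m p) ∧
    (∀ p ∈ (cs.foldl (pvBCand m (m.length : Int) (((PySem.List.pyGetD m 0 []).length : Int)) ch) (cm, nf)).1, pvReach m ch seed p) ∧
    (∀ p ∈ (cs.foldl (pvBCand m (m.length : Int) (((PySem.List.pyGetD m 0 []).length : Int)) ch) (cm, nf)).1,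
      p ∈ cm ∨ p ∈ (cs.foldl (pvBCand m (m.length : Int) (((PySem.List.pyGetD m 0 []).length : Int)) ch) (cm, nf)).2) ∧
    (∀ p ∈ (cs.foldl (pvBCand m (m.length : Int) (((PySem.List.pyGetD m 0 []).length : Int)) ch) (cm, nf)).2, p ∈ nf ∨ p ∈ (cs.foldl (pvBCand m (m.length : Int) (((PySem.List.pyGetD m 0 []).length : Int)) ch) (cm, nf)).1) ∧
    (cs.foldl (pvBCand m (m.length : Int) (((PySem.List.pyGetD m 0 []).length : Int)) ch) (cm, nf)).1.length + nf.length =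
      cm.length + (cs.foldl (pvBCand m (m.length : Int) (((PySem.List.pyGetD m 0 []).length : Int)) ch) (cm, nf)).2.length ∧
    (∀ q ∈ cs, pvStep m ch x q → q ∈ (cs.foldl (pvBCand m (m.length : Int) (((PySem.List.pyGetD m 0 []).length : Int)) ch) (cm, nf)).1) ∧
    nf <+: (cs.foldl (pvBCand m (m.length : Int) (((PySem.List.pyGetD m 0 []).length : Int)) ch) (cm, nf)).2 ∧
    ((cs.foldl (pvBCand m (m.length : Int) (((PySem.List.pyGetD m 0 []).length : Int)) ch) (cm, nf)).2 = nf →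
      (cs.foldl (pvBCand m (m.length : Int) (((PySem.List.pyGetD m 0 []).length : Int)) ch) (cm, nf)) = (cm, nf)) := by
  intro cs
  induction cs with
  | nil =>
    intro _ cm nf h1 h2 h3
    exact ⟨h1, fun p hp => hp, h2, h3, fun p hp => Or.inl hp, fun p hp => Or.inl hp, rfl,
      by intro q hq; simp at hq, List.prefix_refl _, fun _ => rfl⟩
  | cons c cs ih =>
    intro hadj cm nf h1 h2 h3
    by_cases hc : 0 ≤ c.1 ∧ c.1 < (m.length : Int) ∧ 0 ≤ c.2 ∧
        c.2 < (((PySem.List.pyGetD m 0 []).length : Int)) ∧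
        PySem.Set.contains (cm : PySem.Set (Int × Int)) c = false ∧ pvMatAt m c.1 c.2 = ch
    · have hadd : PySem.Set.add (cm : PySem.Set (Int × Int)) c = cm ++ [c] := by
        unfold PySem.Set.add
        rw [if_neg (by rw [hc.2.2.2.2.1]; simp)]
      have hstep1 : pvBCand m (m.length : Int) (((PySem.List.pyGetD m 0 []).length : Int)) ch (cm, nf) c =
          (cm ++ [c], nf ++ [c]) := by
        unfold pvBCand
        rw [if_pos hc, hadd]
      have hgc : pvInG m c := ⟨hc.1, hc.2.1, hc.2.2.1, hc.2.2.2.1⟩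
      have hreach_c : pvReach m ch seed c :=
        Relation.ReflTransGen.tail hx ⟨hgc, hadj c (by simp), hc.2.2.2.2.2⟩
      have hnd1 : (cm ++ [c]).Nodup := by
        rw [← hadd]
        exact PySem.Set.nodup_add _ _ h1
      have hih := ih (fun q hq => hadj q (by simp [hq])) (cm ++ [c]) (nf ++ [c]) hnd1
        (by intro p hp; rcases List.mem_append.1 hp with h | h
            · exact h2 p h
            · rw [List.mem_singleton.1 h]; exact hgc)
        (by intro p hp; rcases List.mem_append.1 hp with h | h
            · exact h3 p h
            · rw [List.mem_singleton.1 h]; exact hreach_c)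
      rw [List.foldl_cons, hstep1]
      obtain ⟨i1, i2, i3, i4, i5, i6, i7, i8, i9, i10⟩ := hih
      refine ⟨i1, fun p hp => i2 p (List.mem_append.2 (Or.inl hp)), i3, i4, ?_, ?_, ?_, ?_, ?_, ?_⟩
      · intro p hp
        rcases i5 p hp with h | h
        · rcases List.mem_append.1 h with h' | h'
          · exact Or.inl h'
          · exact Or.inr (i9.subset (List.mem_append.2 (Or.inr h')))
        · exact Or.inr h
      · intro p hp
        rcases i6 p hp with h | h
        · rcases List.mem_append.1 h with h' | h'
          · exact Or.inl h'
          · rw [List.mem_singleton.1 h']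
            exact Or.inr (i2 c (List.mem_append.2 (Or.inr (by simp))))
        · exact Or.inr h
      · simp only [List.length_append, List.length_cons, List.length_nil] at i7 ⊢
        omega
      · intro q hq hqs
        rcases List.mem_cons.1 hq with h | h
        · subst h
          exact i2 q (List.mem_append.2 (Or.inr (by simp)))
        · exact i8 q h hqs
      · exact (List.prefix_append nf [c]).trans i9
      · intro heq
        exfalso
        have hl := i9.length_le
        rw [heq] at hl
        simp at hl
    · have hstep1 : pvBCand m (m.length : Int) (((PySem.List.pyGetD m 0 []).length : Int)) ch (cm, nf) c = (cm, nf) := by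
        unfold pvBCand
        rw [if_neg hc]
      rw [List.foldl_cons, hstep1]
      have hih := ih (fun q hq => hadj q (by simp [hq])) cm nf h1 h2 h3
      obtain ⟨i1, i2, i3, i4, i5, i6, i7, i8, i9, i10⟩ := hih
      refine ⟨i1, i2, i3, i4, i5, i6, i7, ?_, i9, i10⟩
      intro q hq hqs
      rcases List.mem_cons.1 hq with h | h
      · subst h
        have hcm : q ∈ cm := by
          by_contra hnc
          apply hc
          refine ⟨hqs.1.1, hqs.1.2.1, hqs.1.2.2.1, hqs.1.2.2.2, ?_, hqs.2.2⟩
          cases hct : PySem.Set.contains (cm : PySem.Set (Int × Int)) q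
          · rfl
          · exact absurd ((PySem.Set.contains_iff _ _).1 hct) hnc
        exact i2 q hcm
      · exact i8 q h hqs

lemma pvNbrs_adj (p q : Int × Int)
    (h : q ∈ [(p.1 - 1, p.2), (p.1 + 1, p.2), (p.1, p.2 - 1), (p.1, p.2 + 1)]) : pvAdj p q := by
  fin_cases h <;> (unfold pvAdj; dsimp; omega)

lemma pvAdj_mem_nbrs {p q : Int × Int} (h : pvAdj p q) :
    q ∈ [(p.1 - 1, p.2), (p.1 + 1, p.2), (p.1, p.2 - 1), (p.1, p.2 + 1)] := by
  rcases q with ⟨x, y⟩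
  unfold pvAdj at h; dsimp at h
  simp only [List.mem_cons, List.mem_singleton, Prod.mk.injEq]
  rcases h with ⟨h1, h2⟩ | ⟨h1, h2⟩ | ⟨h1, h2⟩ | ⟨h1, h2⟩
  · exact Or.inl ⟨by omega, by omega⟩
  · exact Or.inr (Or.inl ⟨by omega, by omega⟩)
  · exact Or.inr (Or.inr (Or.inl ⟨by omega, by omega⟩))
  · exact Or.inr (Or.inr (Or.inr (Or.inl ⟨by omega, by omega⟩)))

lemma pvBExpand_fold {m : List (List String)} {ch : String} {seed : Int × Int} :
    ∀ (fr : List (Int × Int)), (∀ p ∈ fr, pvReach m ch seed p) →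
    ∀ (cm nf : List (Int × Int)), cm.Nodup → (∀ p ∈ cm, pvInG m p) →
      (∀ p ∈ cm, pvReach m ch seed p) →
    (fr.foldl (pvBExpand m (m.length : Int) (((PySem.List.pyGetD m 0 []).length : Int)) ch) (cm, nf)).1.Nodup ∧
    (∀ p ∈ cm, p ∈ (fr.foldl (pvBExpand m (m.length : Int) (((PySem.List.pyGetD m 0 []).length : Int)) ch) (cm, nf)).1) ∧
    (∀ p ∈ (fr.foldl (pvBExpand m (m.length : Int) (((PySem.List.pyGetD m 0 []).length : Int)) ch) (cm, nf)).1, pvInG m p) ∧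
    (∀ p ∈ (fr.foldl (pvBExpand m (m.length : Int) (((PySem.List.pyGetD m 0 []).length : Int)) ch) (cm, nf)).1, pvReach m ch seed p) ∧
    (∀ p ∈ (fr.foldl (pvBExpand m (m.length : Int) (((PySem.List.pyGetD m 0 []).length : Int)) ch) (cm, nf)).1,
      p ∈ cm ∨ p ∈ (fr.foldl (pvBExpand m (m.length : Int) (((PySem.List.pyGetD m 0 []).length : Int)) ch) (cm, nf)).2) ∧
    (∀ p ∈ (fr.foldl (pvBExpand m (m.length : Int) (((PySem.List.pyGetD m 0 []).length : Int)) ch) (cm, nf)).2, p ∈ nf ∨ p ∈ (fr.foldl (pvBExpand m (m.length : Int) (((PySem.List.pyGetD m 0 []).length : Int)) ch) (cm, nf)).1) ∧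
    (fr.foldl (pvBExpand m (m.length : Int) (((PySem.List.pyGetD m 0 []).length : Int)) ch) (cm, nf)).1.length + nf.length =
      cm.length + (fr.foldl (pvBExpand m (m.length : Int) (((PySem.List.pyGetD m 0 []).length : Int)) ch) (cm, nf)).2.length ∧
    (∀ x ∈ fr, ∀ q, pvStep m ch x q → q ∈ (fr.foldl (pvBExpand m (m.length : Int) (((PySem.List.pyGetD m 0 []).length : Int)) ch) (cm, nf)).1) ∧
    nf <+: (fr.foldl (pvBExpand m (m.length : Int) (((PySem.List.pyGetD m 0 []).length : Int)) ch) (cm, nf)).2 ∧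
    ((fr.foldl (pvBExpand m (m.length : Int) (((PySem.List.pyGetD m 0 []).length : Int)) ch) (cm, nf)).2 = nf →
      (fr.foldl (pvBExpand m (m.length : Int) (((PySem.List.pyGetD m 0 []).length : Int)) ch) (cm, nf)) = (cm, nf)) := by
  intro fr
  induction fr with
  | nil =>
    intro _ cm nf h1 h2 h3
    exact ⟨h1, fun p hp => hp, h2, h3, fun p hp => Or.inl hp, fun p hp => Or.inl hp, rfl,
      by intro x hx; simp at hx, List.prefix_refl _, fun _ => rfl⟩
  | cons x fr ih =>
    intro hfr cm nf h1 h2 h3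
    have hx : pvReach m ch seed x := hfr x (by simp)
    have hcand := pvBCand_fold x hx
      [(x.1 - 1, x.2), (x.1 + 1, x.2), (x.1, x.2 - 1), (x.1, x.2 + 1)]
      (pvNbrs_adj x) cm nf h1 h2 h3
    rcases hr1 : ([(x.1 - 1, x.2), (x.1 + 1, x.2), (x.1, x.2 - 1), (x.1, x.2 + 1)].foldl
        (pvBCand m (m.length : Int) (((PySem.List.pyGetD m 0 []).length : Int)) ch) (cm, nf)) with ⟨cm1, nf1⟩
    rw [hr1] at hcand
    dsimp only at hcand
    obtain ⟨c1, c2, c3, c4, c5, c6, c7, c8, c9, c10⟩ := hcand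
    have hstep1 : pvBExpand m (m.length : Int) (((PySem.List.pyGetD m 0 []).length : Int)) ch (cm, nf) x = (cm1, nf1) := by
      unfold pvBExpand
      exact hr1
    rw [List.foldl_cons, hstep1]
    have hih := ih (fun p hp => hfr p (by simp [hp])) cm1 nf1 c1 c3 c4
    obtain ⟨i1, i2, i3, i4, i5, i6, i7, i8, i9, i10⟩ := hih
    refine ⟨i1, fun p hp => i2 p (c2 p hp), i3, i4, ?_, ?_, ?_, ?_, c9.trans i9, ?_⟩
    · intro p hp
      rcases i5 p hp with h | h
      · rcases c5 p h with h' | h'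
        · exact Or.inl h'
        · exact Or.inr (i9.subset h')
      · exact Or.inr h
    · intro p hp
      rcases i6 p hp with h | h
      · rcases c6 p h with h' | h'
        · exact Or.inl h'
        · exact Or.inr (i2 p h')
      · exact Or.inr h
    · omega
    · intro y hy q hq
      rcases List.mem_cons.1 hy with h | h
      · subst h
        exact i2 q (c8 q (pvAdj_mem_nbrs hq.2.1) hq)
      · exact i8 y h q hq
    · intro heq
      have hnf1 : nf1 = nf := by
        have hpre : nf1 <+: nf := by rw [← heq]; exact i9
        have hl1 := c9.length_le
        have hl2 := hpre.length_le
        exact hpre.eq_of_length (by omega)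
      subst hnf1
      have hc := c10 rfl
      have hcm1 : cm1 = cm := congrArg Prod.fst hc
      subst hcm1
      exact i10 heq

lemma pvGrid_length (m : List (List String)) :
    (pvGrid m).length = m.length * (PySem.List.pyGetD m 0 []).length := by
  unfold pvGrid
  rw [List.length_product, PySem.List.length_pyRange_one, PySem.List.length_pyRange_one]
  simp

lemma pvBfs_spec {m : List (List String)} {ch : String} {seed : Int × Int}
    (hg : pvInG m seed) (hchar : pvMatAt m seed.1 seed.2 = ch) :
    ∀ (fuel : Nat) (comp frontier : List (Int × Int)), pvBInv m ch seed comp frontier →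
    (pvGrid m).length - comp.length + (if frontier = [] then 0 else 1) < fuel →
    (pvBfs m (m.length : Int) (((PySem.List.pyGetD m 0 []).length : Int)) ch fuel comp frontier).Nodup ∧
    (∀ p : Int × Int, p ∈ pvBfs m (m.length : Int) (((PySem.List.pyGetD m 0 []).length : Int)) ch fuel comp frontier ↔
      pvReach m ch seed p) ∧
    (∀ p ∈ pvBfs m (m.length : Int) (((PySem.List.pyGetD m 0 []).length : Int)) ch fuel comp frontier, pvInG m p) := by
  intro fuel
  induction fuel with
  | zero => intro comp frontier _ hm; omega
  | succ f ih =>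
    intro comp frontier hInv hm
    by_cases hf : frontier = []
    · subst hf
      have hloop : pvBfs m (m.length : Int) (((PySem.List.pyGetD m 0 []).length : Int)) ch (f + 1) comp [] = comp := by
        conv_lhs => rw [pvBfs]
        simp
      rw [hloop]
      refine ⟨hInv.nodup, ?_, hInv.sub⟩
      intro p
      constructor
      · exact hInv.sound p
      · intro h
        induction h with
        | refl => exact hInv.seedIn
        | tail hr hstep ihr =>
          rename_i b c
          exact hInv.closedOff b ihr (by simp) c hstep
    · have hexp := pvBExpand_fold frontier (fun p hp => hInv.sound p (hInv.frontSub p hp))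
        comp [] hInv.nodup hInv.sub hInv.sound
      rcases hr1 : (frontier.foldl (pvBExpand m (m.length : Int) (((PySem.List.pyGetD m 0 []).length : Int)) ch) (comp, [])) with ⟨comp1, nf1⟩
      rw [hr1] at hexp
      dsimp only at hexp
      obtain ⟨e1, e2, e3, e4, e5, e6, e7, e8, e9, e10⟩ := hexp
      have hloop : pvBfs m (m.length : Int) (((PySem.List.pyGetD m 0 []).length : Int)) ch (f + 1) comp frontier =
          pvBfs m (m.length : Int) (((PySem.List.pyGetD m 0 []).length : Int)) ch f comp1 nf1 := by
        conv_lhs => rw [pvBfs]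
        rw [if_neg hf]
        rw [hr1]
      rw [hloop]
      have hInv1 : pvBInv m ch seed comp1 nf1 := by
        refine ⟨e1, e2 seed hInv.seedIn, e3, e4, ?_, ?_⟩
        · intro p hp
          rcases e6 p hp with h | h
          · simp at h
          · exact h
        · intro p hp hnp q hq
          rcases e5 p hp with h | h
          · by_cases hfr : p ∈ frontier
            · exact e8 p hfr q hq
            · exact e2 q (hInv.closedOff p h hfr q hq)
          · exact absurd h hnp
      have hsub1 : comp1.length ≤ (pvGrid m).length :=
        (List.Nodup.subperm e1 (fun p hp => pvMem_grid.2 (e3 p hp))).length_le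
      by_cases hnf1 : nf1 = []
      · have hc := e10 (by rw [hnf1])
        have hcm1 : comp1 = comp := congrArg Prod.fst hc
        subst hcm1 hnf1
        refine ih comp1 [] hInv1 ?_
        rw [if_neg hf] at hm
        simp only [reduceIte]
        omega
      · have hlen : comp1.length = comp.length + nf1.length := by
          simpa using e7
        have hpos : 1 ≤ nf1.length := by
          rcases nf1 with _ | ⟨a, t⟩
          · exact absurd rfl hnf1
          · simp
        refine ih comp1 nf1 hInv1 ?_
        rw [if_neg hf] at hm
        rw [if_neg hnf1]
        omega

lemma pvBCall_spec {m : List (List String)} {seed : Int × Int} (hg : pvInG m seed) :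
    (pvBfs m (m.length : Int) (((PySem.List.pyGetD m 0 []).length : Int)) (pvMatAt m seed.1 seed.2)
      (m.length * (PySem.List.pyGetD m 0 []).length + 2)
      (PySem.Set.ofList [(seed.1, seed.2)]) [(seed.1, seed.2)]).Nodup ∧
    (∀ p : Int × Int, p ∈ pvBfs m (m.length : Int) (((PySem.List.pyGetD m 0 []).length : Int)) (pvMatAt m seed.1 seed.2)
      (m.length * (PySem.List.pyGetD m 0 []).length + 2)
      (PySem.Set.ofList [(seed.1, seed.2)]) [(seed.1, seed.2)] ↔ pvReach m (pvMatAt m seed.1 seed.2) seed p) ∧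
    (∀ p ∈ pvBfs m (m.length : Int) (((PySem.List.pyGetD m 0 []).length : Int)) (pvMatAt m seed.1 seed.2)
      (m.length * (PySem.List.pyGetD m 0 []).length + 2)
      (PySem.Set.ofList [(seed.1, seed.2)]) [(seed.1, seed.2)], pvInG m p) := by
  have hofl : PySem.Set.ofList [((seed.1 : Int), (seed.2 : Int))] = [(seed.1, seed.2)] := rfl
  have hInv : pvBInv m (pvMatAt m seed.1 seed.2) seed (PySem.Set.ofList [(seed.1, seed.2)]) [(seed.1, seed.2)] := by
    rw [hofl]
    have hseta : ((seed.1, seed.2) : Int × Int) = seed := rfl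
    refine ⟨List.nodup_singleton _, by rw [hseta]; exact List.mem_singleton_self _, ?_, ?_, fun p hp => hp, ?_⟩
    · intro p hp
      rw [List.mem_singleton.1 hp, hseta]
      exact hg
    · intro p hp
      rw [List.mem_singleton.1 hp, hseta]
      exact Relation.ReflTransGen.refl
    · intro p hp hnp
      exact absurd hp hnp
  refine pvBfs_spec hg rfl (m.length * (PySem.List.pyGetD m 0 []).length + 2)
    (PySem.Set.ofList [(seed.1, seed.2)]) [(seed.1, seed.2)] hInv ?_
  rw [hofl]
  rw [if_neg (by simp)]
  rw [pvGrid_length]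
  simp only [List.length_cons, List.length_nil]
  omega

-- ---- counting: |newly seen| = |component| ----
lemma pvCountP_split {α : Type} (l : List α) (p q : α → Bool) :
    l.countP p = l.countP (fun a => p a && q a) + l.countP (fun a => p a && !q a) := by
  induction l with
  | nil => simp
  | cons a t ih =>
    simp only [List.countP_cons, ih]
    cases hp : p a <;> cases hq : q a <;> simp <;> omega

lemma pvCount_mem_eq_length {l comp : List (Int × Int)} (hl : l.Nodup) (hc : comp.Nodup)
    (hsub : ∀ p ∈ comp, p ∈ l) :
    l.countP (fun p => decide (p ∈ comp)) = comp.length := by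
  rw [List.countP_eq_length_filter]
  refine List.Perm.length_eq ((List.perm_ext_iff_of_nodup (List.Nodup.filter _ hl) hc).2 ?_)
  intro a
  rw [List.mem_filter]
  constructor
  · intro h
    exact of_decide_eq_true h.2
  · intro h
    exact ⟨hsub a h, decide_eq_true h⟩

-- the relation carried through the outer row/column loops of A and B
def pvRel (m : List (List String)) (a : List (List Bool) × Int) (b : PySem.Set (Int × Int) × Int) : Prop :=
  pvShape m a.1 ∧ b.1.Nodup ∧ (∀ p ∈ b.1, pvInG m p) ∧
  (∀ p : Int × Int, pvInG m p → (pvSeenAt a.1 p.1 p.2 = true ↔ p ∈ b.1)) ∧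
  (∀ p q : Int × Int, pvInG m p → pvSeenAt a.1 p.1 p.2 = true →
    pvStep m (pvMatAt m p.1 p.2) p q → pvSeenAt a.1 q.1 q.2 = true) ∧
  a.2 = b.2

lemma pvFold_rel {α A B : Type} (R : A → B → Prop) (fA : A → α → A) (fB : B → α → B)
    (l : List α) (h : ∀ a b x, x ∈ l → R a b → R (fA a x) (fB b x)) :
    ∀ a b, R a b → R (l.foldl fA a) (l.foldl fB b) := by
  induction l with
  | nil => intro a b hr; exact hr
  | cons x t ih =>
    intro a b hr
    exact ih (fun a b y hy => h a b y (by simp [hy])) (fA a x) (fB b x) (h a b x (by simp) hr)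

-- per unvisited seed: A's find_block and B's bfs mark the same component and count its size
lemma pvSeed_eq {m : List (List String)} {sn0 : List (List Bool)} {done : PySem.Set (Int × Int)}
    (hsh : pvShape m sn0) (hnd : done.Nodup) (hdg : ∀ p ∈ done, pvInG m p)
    (hiff : ∀ p : Int × Int, pvInG m p → (pvSeenAt sn0 p.1 p.2 = true ↔ p ∈ done))
    (hcl0 : ∀ p q : Int × Int, pvInG m p → pvSeenAt sn0 p.1 p.2 = true →
      pvStep m (pvMatAt m p.1 p.2) p q → pvSeenAt sn0 q.1 q.2 = true)
    {seed : Int × Int} (hg : pvInG m seed) (h00 : pvSeenAt sn0 seed.1 seed.2 = false) :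
    (pvFindBlock m sn0 seed.1 seed.2).1 =
      ((pvBfs m (m.length : Int) (((PySem.List.pyGetD m 0 []).length : Int)) (pvMatAt m seed.1 seed.2)
        (m.length * (PySem.List.pyGetD m 0 []).length + 2)
        (PySem.Set.ofList [(seed.1, seed.2)]) [(seed.1, seed.2)]).length : Int) ∧
    (∀ p : Int × Int, pvInG m p →
      (pvSeenAt (pvFindBlock m sn0 seed.1 seed.2).2 p.1 p.2 = true ↔
        (p ∈ done ∨ p ∈ pvBfs m (m.length : Int) (((PySem.List.pyGetD m 0 []).length : Int)) (pvMatAt m seed.1 seed.2)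
          (m.length * (PySem.List.pyGetD m 0 []).length + 2)
          (PySem.Set.ofList [(seed.1, seed.2)]) [(seed.1, seed.2)]))) ∧
    pvShape m (pvFindBlock m sn0 seed.1 seed.2).2 := by
  obtain ⟨hfsh, hfiff, hfcnt⟩ := pvFindBlock_spec hsh hcl0 hg h00
  obtain ⟨hbnd, hbiff, hbsub⟩ := pvBCall_spec (m := m) (seed := seed) hg
  have hS : pvClosed m (fun p => pvInG m p ∧ pvSeenAt sn0 p.1 p.2 = true) :=
    fun p q hp hq => ⟨hq.1, hcl0 p q hp.1 hp.2 hq⟩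
  have hnot : ∀ x : Int × Int, pvReach m (pvMatAt m seed.1 seed.2) seed x → pvInG m x →
      pvSeenAt sn0 x.1 x.2 = false := by
    intro x hx hgx
    have := pvReach_not_closed hS hg rfl
      (fun hcc => by rw [h00] at hcc; exact Bool.false_ne_true hcc.2) hx
    by_contra hh
    rw [Bool.not_eq_false] at hh
    exact this ⟨hgx, hh⟩
  refine ⟨?_, ?_, hfsh⟩
  · -- counts
    have hu0 := pvUnseen_eq_countP hsh
    have hu1 := pvUnseen_eq_countP hfsh
    have hsplit := pvCountP_split (pvGrid m) (fun p => !pvSeenAt sn0 p.1 p.2)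
      (fun p => decide (p ∈ pvBfs m (m.length : Int) (((PySem.List.pyGetD m 0 []).length : Int)) (pvMatAt m seed.1 seed.2)
        (m.length * (PySem.List.pyGetD m 0 []).length + 2)
        (PySem.Set.ofList [(seed.1, seed.2)]) [(seed.1, seed.2)]))
    have he1 : (pvGrid m).countP (fun p => !pvSeenAt sn0 p.1 p.2 &&
        decide (p ∈ pvBfs m (m.length : Int) (((PySem.List.pyGetD m 0 []).length : Int)) (pvMatAt m seed.1 seed.2)
          (m.length * (PySem.List.pyGetD m 0 []).length + 2)
          (PySem.Set.ofList [(seed.1, seed.2)]) [(seed.1, seed.2)])) =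
        (pvGrid m).countP (fun p => decide (p ∈ pvBfs m (m.length : Int) (((PySem.List.pyGetD m 0 []).length : Int)) (pvMatAt m seed.1 seed.2)
          (m.length * (PySem.List.pyGetD m 0 []).length + 2)
          (PySem.Set.ofList [(seed.1, seed.2)]) [(seed.1, seed.2)])) := by
      refine List.countP_congr ?_
      intro p hp
      simp only [Bool.and_eq_true, decide_eq_true_eq]
      constructor
      · exact fun h => h.2
      · intro h
        refine ⟨?_, h⟩
        rw [hnot p ((hbiff p).1 h) (pvMem_grid.1 hp)]
        simp
    have he2 : (pvGrid m).countP (fun p => !pvSeenAt sn0 p.1 p.2 &&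
        !decide (p ∈ pvBfs m (m.length : Int) (((PySem.List.pyGetD m 0 []).length : Int)) (pvMatAt m seed.1 seed.2)
          (m.length * (PySem.List.pyGetD m 0 []).length + 2)
          (PySem.Set.ofList [(seed.1, seed.2)]) [(seed.1, seed.2)])) =
        (pvGrid m).countP (fun p => !pvSeenAt (pvFindBlock m sn0 seed.1 seed.2).2 p.1 p.2) := by
      refine List.countP_congr ?_
      intro p hp
      have hpg := pvMem_grid.1 hp
      simp only [Bool.and_eq_true, Bool.not_eq_true', decide_eq_true_eq, Bool.not_eq_true,
        decide_eq_false_iff_not]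
      constructor
      · rintro ⟨h1, h2⟩
        have := hfiff p hpg
        rw [Bool.eq_false_iff]
        intro hcon
        rcases (hfiff p hpg).1 hcon with h | h
        · rw [h1] at h; exact Bool.false_ne_true h
        · exact h2 ((hbiff p).2 h)
      · intro h1
        constructor
        · rw [Bool.eq_false_iff]
          intro hcon
          have : pvSeenAt (pvFindBlock m sn0 seed.1 seed.2).2 p.1 p.2 = true :=
            (hfiff p hpg).2 (Or.inl hcon)
          rw [h1] at this
          exact Bool.false_ne_true this
        · intro hcon
          have : pvSeenAt (pvFindBlock m sn0 seed.1 seed.2).2 p.1 p.2 = true :=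
            (hfiff p hpg).2 (Or.inr ((hbiff p).1 hcon))
          rw [h1] at this
          exact Bool.false_ne_true this
    have hcnt2 := pvCount_mem_eq_length (pvNodup_grid m) hbnd
      (fun p hp => pvMem_grid.2 (hbsub p hp))
    rw [he1, he2, hcnt2] at hsplit
    rw [hu0, hu1] at hfcnt
    omega
  · -- membership
    intro p hp
    rw [hfiff p hp]
    constructor
    · rintro (h | h)
      · exact Or.inl ((hiff p hp).1 h)
      · exact Or.inr ((hbiff p).2 h)
    · rintro (h | h)
      · exact Or.inl ((hiff p hp).2 h)
      · exact Or.inr ((hbiff p).1 h)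

lemma pvCell_rel {m : List (List String)} (r c : Int) (hg : pvInG m (r, c))
    (a : List (List Bool) × Int) (b : PySem.Set (Int × Int) × Int) (hr : pvRel m a b) :
    pvRel m
      (if pvSeenAt a.1 r c = true then a else
        ((pvFindBlock m a.1 r c).2,
         if (pvFindBlock m a.1 r c).1 > a.2 then (pvFindBlock m a.1 r c).1 else a.2))
      (if PySem.Set.contains b.1 (r, c) = true then b else
        (PySem.Set.union b.1 (pvBfs m (m.length : Int) (((PySem.List.pyGetD m 0 []).length : Int)) (pvMatAt m r c)
            (m.length * (PySem.List.pyGetD m 0 []).length + 2)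
            (PySem.Set.ofList [(r, c)]) [(r, c)]),
         max b.2 ((pvBfs m (m.length : Int) (((PySem.List.pyGetD m 0 []).length : Int)) (pvMatAt m r c)
            (m.length * (PySem.List.pyGetD m 0 []).length + 2)
            (PySem.Set.ofList [(r, c)]) [(r, c)]).length : Int))) := by
  obtain ⟨h1, h2, h3, h4, h5, h6⟩ := hr
  by_cases hs : pvSeenAt a.1 r c = true
  · have hct : PySem.Set.contains b.1 (r, c) = true :=
      (PySem.Set.contains_iff _ _).2 ((h4 (r, c) hg).1 hs)
    rw [if_pos hs, if_pos hct]
    exact ⟨h1, h2, h3, h4, h5, h6⟩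
  · have hcf : PySem.Set.contains b.1 (r, c) = false := by
      cases hct : PySem.Set.contains b.1 (r, c)
      · rfl
      · exact absurd ((h4 (r, c) hg).2 ((PySem.Set.contains_iff _ _).1 hct)) hs
    have hA : (if pvSeenAt a.1 r c = true then a else
        ((pvFindBlock m a.1 r c).2,
         if (pvFindBlock m a.1 r c).1 > a.2 then (pvFindBlock m a.1 r c).1 else a.2)) =
        ((pvFindBlock m a.1 r c).2,
         if (pvFindBlock m a.1 r c).1 > a.2 then (pvFindBlock m a.1 r c).1 else a.2) := if_neg hs
    have hB : (if PySem.Set.contains b.1 (r, c) = true then b else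
        (PySem.Set.union b.1 (pvBfs m (m.length : Int) (((PySem.List.pyGetD m 0 []).length : Int)) (pvMatAt m r c)
            (m.length * (PySem.List.pyGetD m 0 []).length + 2)
            (PySem.Set.ofList [(r, c)]) [(r, c)]),
         max b.2 ((pvBfs m (m.length : Int) (((PySem.List.pyGetD m 0 []).length : Int)) (pvMatAt m r c)
            (m.length * (PySem.List.pyGetD m 0 []).length + 2)
            (PySem.Set.ofList [(r, c)]) [(r, c)]).length : Int))) =
        (PySem.Set.union b.1 (pvBfs m (m.length : Int) (((PySem.List.pyGetD m 0 []).length : Int)) (pvMatAt m r c)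
            (m.length * (PySem.List.pyGetD m 0 []).length + 2)
            (PySem.Set.ofList [(r, c)]) [(r, c)]),
         max b.2 ((pvBfs m (m.length : Int) (((PySem.List.pyGetD m 0 []).length : Int)) (pvMatAt m r c)
            (m.length * (PySem.List.pyGetD m 0 []).length + 2)
            (PySem.Set.ofList [(r, c)]) [(r, c)]).length : Int)) := if_neg (by rw [hcf]; simp)
    rw [hA, hB]
    have hs0 : pvSeenAt a.1 r c = false := Bool.not_eq_true _ ▸ (Bool.eq_false_iff.2 (fun h => hs h))
    have hseed := pvSeed_eq (done := b.1) h1 h2 h3 h4 h5 hg hs0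
    have hb := pvBCall_spec (m := m) (seed := ((r, c) : Int × Int)) hg
    obtain ⟨hbnd, hbiff, hbsub⟩ := hb
    refine ⟨hseed.2.2, PySem.Set.nodup_union _ _ h2, ?_, ?_, ?_, ?_⟩
    · intro p hp
      rcases (PySem.Set.mem_union _ _ _).1 hp with h | h
      · exact h3 p h
      · exact hbsub p h
    · intro p hp
      rw [hseed.2.1 p hp, PySem.Set.mem_union]
    · intro p q hp hsp hq
      have hsp' := (hseed.2.1 p hp).1 hsp
      have hgq : pvInG m q := hq.1
      rcases hsp' with h | h
      · have hpa : pvSeenAt a.1 p.1 p.2 = true := (h4 p hp).2 h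
        have := h5 p q hp hpa hq
        exact (hseed.2.1 q hgq).2 (Or.inl ((h4 q hgq).1 this))
      · have hreach := (hbiff p).1 h
        have hprops := pvReach_props hg rfl hreach
        have hq' : pvStep m (pvMatAt m r c) p q := ⟨hq.1, hq.2.1, hq.2.2.trans hprops.2⟩
        exact (hseed.2.1 q hgq).2 (Or.inr ((hbiff q).2 (Relation.ReflTransGen.tail hreach hq')))
    · show (if (pvFindBlock m a.1 r c).1 > a.2 then (pvFindBlock m a.1 r c).1 else a.2) = _
      rw [← h6, ← hseed.1]
      split_ifs with h
      · exact (max_eq_right (le_of_lt h)).symm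
      · exact (max_eq_left (not_lt.1 h)).symm

lemma pvInit_rel (m : List (List String)) :
    pvRel m
      ((PySem.List.pyRange 0 (m.length : Int) 1).foldl
        (fun sn _ => sn ++ [List.replicate (((PySem.List.pyGetD m 0 []).length : Int)).toNat false]) [], 0)
      ((PySem.Set.empty : PySem.Set (Int × Int)), 0) := by
  have hseen0 : (PySem.List.pyRange 0 (m.length : Int) 1).foldl
      (fun sn _ => sn ++ [List.replicate (((PySem.List.pyGetD m 0 []).length : Int)).toNat false]) [] =
      (PySem.List.pyRange 0 (m.length : Int) 1).map
        (fun _ => List.replicate (((PySem.List.pyGetD m 0 []).length : Int)).toNat false) := by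
    rw [PySem.List.foldl_append_singleton_eq_map
      (fun _ => List.replicate (((PySem.List.pyGetD m 0 []).length : Int)).toNat false)
      (PySem.List.pyRange 0 (m.length : Int) 1) []]
    rfl
  have hlen : ((PySem.List.pyRange 0 (m.length : Int) 1).map
      (fun _ => List.replicate (((PySem.List.pyGetD m 0 []).length : Int)).toNat false)).length = m.length := by
    rw [List.length_map, PySem.List.length_pyRange_one]
    simp
  have hsh : pvShape m ((PySem.List.pyRange 0 (m.length : Int) 1).foldl
      (fun sn _ => sn ++ [List.replicate (((PySem.List.pyGetD m 0 []).length : Int)).toNat false]) []) := by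
    rw [hseen0]
    refine ⟨hlen, ?_⟩
    intro row hrow
    rcases List.mem_map.1 hrow with ⟨_, _, hr⟩
    rw [← hr, List.length_replicate]
    simp
  have hseenF : ∀ p : Int × Int, pvInG m p →
      pvSeenAt ((PySem.List.pyRange 0 (m.length : Int) 1).foldl
        (fun sn _ => sn ++ [List.replicate (((PySem.List.pyGetD m 0 []).length : Int)).toNat false]) []) p.1 p.2 = false := by
    intro p hp
    obtain ⟨hp1, hp2, hp3, hp4⟩ := hp
    rw [hseen0]
    have hp2' : p.1.toNat < ((PySem.List.pyRange 0 (m.length : Int) 1).map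
        (fun _ => List.replicate (((PySem.List.pyGetD m 0 []).length : Int)).toNat false)).length := by
      rw [hlen]; omega
    have hrow : ((PySem.List.pyRange 0 (m.length : Int) 1).map
        (fun _ => List.replicate (((PySem.List.pyGetD m 0 []).length : Int)).toNat false))[p.1.toNat] =
        List.replicate (((PySem.List.pyGetD m 0 []).length : Int)).toNat false := by
      rw [List.getElem_map]
    rw [pvSeenAt_eq_getElem _ p.1 p.2 hp1 hp2' hp3 (by rw [hrow, List.length_replicate]; simp; omega)]
    simp [List.getElem_map]
  refine ⟨hsh, List.nodup_nil, by intro p hp; simp [PySem.Set.empty] at hp, ?_, ?_, rfl⟩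
  · intro p hp
    rw [hseenF p hp]
    simp [PySem.Set.empty]
  · intro p q hp hsp _
    rw [hseenF p hp] at hsp
    exact absurd hsp (by simp)

-- ===== VERDICT (by name: the statement is the Claim_ definition above) =====
theorem contiguous_block_spec : Claim_equal_contiguous_block := by
  unfold Claim_equal_contiguous_block
  intro matrix hdom hpre
  unfold Spec_contiguous_block
  have houter : ∀ (a : List (List Bool) × Int) (b : PySem.Set (Int × Int) × Int) (row : Int),
      row ∈ PySem.List.pyRange 0 (matrix.length : Int) 1 → pvRel matrix a b →
      pvRel matrix
        ((PySem.List.pyRange 0 (((PySem.List.pyGetD matrix 0 []).length : Int)) 1).foldl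
          (fun (st : List (List Bool) × Int) col =>
            if pvSeenAt st.1 row col = true then st
            else
              ((pvFindBlock matrix st.1 row col).2,
               if (pvFindBlock matrix st.1 row col).1 > st.2 then (pvFindBlock matrix st.1 row col).1 else st.2)) a)
        ((PySem.List.pyRange 0 (((PySem.List.pyGetD matrix 0 []).length : Int)) 1).foldl
          (fun (st : PySem.Set (Int × Int) × Int) c =>
            if PySem.Set.contains st.1 (row, c) = true then st
            else
              (PySem.Set.union st.1 (pvBfs matrix (matrix.length : Int) (((PySem.List.pyGetD matrix 0 []).length : Int)) (pvMatAt matrix row c)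
                  (matrix.length * (PySem.List.pyGetD matrix 0 []).length + 2)
                  (PySem.Set.ofList [(row, c)]) [(row, c)]),
               max st.2 ((pvBfs matrix (matrix.length : Int) (((PySem.List.pyGetD matrix 0 []).length : Int)) (pvMatAt matrix row c)
                  (matrix.length * (PySem.List.pyGetD matrix 0 []).length + 2)
                  (PySem.Set.ofList [(row, c)]) [(row, c)]).length : Int))) b) := by
    intro a b row hrow hr
    rw [PySem.List.mem_pyRange_one] at hrow
    refine pvFold_rel (pvRel matrix) _ _ _ ?_ a b hr
    intro a' b' col hcol hr'
    rw [PySem.List.mem_pyRange_one] at hcol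
    exact pvCell_rel row col ⟨hrow.1, hrow.2, hcol.1, hcol.2⟩ a' b' hr'
  have hmain := pvFold_rel (pvRel matrix)
    (fun (st : List (List Bool) × Int) row =>
      (PySem.List.pyRange 0 (((PySem.List.pyGetD matrix 0 []).length : Int)) 1).foldl
        (fun (st : List (List Bool) × Int) col =>
          if pvSeenAt st.1 row col = true then st
          else
            ((pvFindBlock matrix st.1 row col).2,
             if (pvFindBlock matrix st.1 row col).1 > st.2 then (pvFindBlock matrix st.1 row col).1 else st.2)) st)
    (fun (st : PySem.Set (Int × Int) × Int) row =>
      (PySem.List.pyRange 0 (((PySem.List.pyGetD matrix 0 []).length : Int)) 1).foldl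
        (fun (st : PySem.Set (Int × Int) × Int) c =>
          if PySem.Set.contains st.1 (row, c) = true then st
          else
            (PySem.Set.union st.1 (pvBfs matrix (matrix.length : Int) (((PySem.List.pyGetD matrix 0 []).length : Int)) (pvMatAt matrix row c)
                (matrix.length * (PySem.List.pyGetD matrix 0 []).length + 2)
                (PySem.Set.ofList [(row, c)]) [(row, c)]),
             max st.2 ((pvBfs matrix (matrix.length : Int) (((PySem.List.pyGetD matrix 0 []).length : Int)) (pvMatAt matrix row c)
                (matrix.length * (PySem.List.pyGetD matrix 0 []).length + 2)
                (PySem.Set.ofList [(row, c)]) [(row, c)]).length : Int))) st)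
    (PySem.List.pyRange 0 (matrix.length : Int) 1) houter
    ((PySem.List.pyRange 0 (matrix.length : Int) 1).foldl
      (fun sn _ => sn ++ [List.replicate (((PySem.List.pyGetD matrix 0 []).length : Int)).toNat false]) [], 0)
    ((PySem.Set.empty : PySem.Set (Int × Int)), 0) (pvInit_rel matrix)
  exact hmain.2.2.2.2.2
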